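-- pv_equiv track=rewrite | github.com/Bjornwolf/nlp_uwr | lista2/literowki2.py | near_signs
-- ===== SOURCE A (Python) =====
-- keyboard = ['###qwertyuiop###','###asdfghjkl###', '###zxcvbnm###']
--
-- def near_signs(sign):
--     if sign in keyboard[0]:
--         i = keyboard[0].find(sign)
--         options = [keyboard[0][j] for j in [i-1, i, i+1]]
--         options += [keyboard[1][j] for j in [i-1, i]]
--     elif sign in keyboard[1]:
--         i = keyboard[1].find(sign)
--         options = [keyboard[0][j] for j in [i, i+1]]
--         options += [keyboard[1][j] for j in [i-1, i, i+1]]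
--         options += [keyboard[2][j] for j in [i-1, i]]
--     else:
--         i = keyboard[2].find(sign)
--         options = [keyboard[1][j] for j in [i, i+1]]
--         options += [keyboard[2][j] for j in [i-1, i, i+1]]
--     return ''.join(options).replace('#', '')
-- ===== SOURCE B (Python) =====
-- keyboard = ['###qwertyuiop###','###asdfghjkl###', '###zxcvbnm###']
--
-- def near_signs(sign):
--     # pick the row by the same membership chain (unknown signs fall through to row 2)
--     if sign in keyboard[0]:
--         r = 0
--     elif sign in keyboard[1]:
--         r = 1
--     else:
--         r = 2
--     i = keyboard[r].find(sign)
--     # scan the WHOLE keyboard row-major and keep every real key whose cell is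
--     # adjacent (hex-style neighbourhood) to (r, i); row-major order is exactly
--     # A's emission order, and padding cells are filtered inline instead of replaced
--     out = []
--     for rr, row in enumerate(keyboard):
--         for cc, ch in enumerate(row):
--             d, e = rr - r, cc - i
--             if abs(d) <= 1 and abs(e) <= 1 and abs(d + e) <= 1 and ch != '#':
--                 out.append(ch)
--     return ''.join(out)
-- ===== Notes on version B (the rewrite author's own statement) =====
-- stated objective: alternative
-- what changed: Instead of indexing the enumerated neighbour offsets per branch and stripping padding afterwards, B scans the entire keyboard grid row-major once and keeps each real key whose cell satisfies an adjacency predicate relative to the found position (r,i); the row is chosen by the same membership chain.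
import Mathlib
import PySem

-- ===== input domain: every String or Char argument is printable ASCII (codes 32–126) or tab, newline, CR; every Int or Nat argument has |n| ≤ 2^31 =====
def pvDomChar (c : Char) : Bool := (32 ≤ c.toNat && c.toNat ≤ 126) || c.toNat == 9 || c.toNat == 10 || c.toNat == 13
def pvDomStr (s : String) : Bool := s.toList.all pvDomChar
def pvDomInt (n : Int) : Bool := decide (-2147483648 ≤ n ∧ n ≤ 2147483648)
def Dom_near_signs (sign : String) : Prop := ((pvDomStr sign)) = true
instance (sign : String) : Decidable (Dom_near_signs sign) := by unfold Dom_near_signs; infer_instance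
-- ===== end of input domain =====

-- B replaces A's per-branch neighbour-index enumeration + '#'-replace by one row-major
-- scan of the whole keyboard grid filtered through an adjacency predicate (alternative).

-- the keyboard rows (module constant of both programs)
def pvKb0 : List Char := "###qwertyuiop###".toList
def pvKb1 : List Char := "###asdfghjkl###".toList
def pvKb2 : List Char := "###zxcvbnm###".toList

-- keyboard[r][j]: Python indexing (negative j wraps). On every input the Python A
-- accesses only in-range cells, so the default is never reached by a reachable i;
-- it only makes the port total.
def pvGetC (row : List Char) (j : Int) : Char := (PySem.List.pyGet? row j).getD '#'

-- ===== PORT A =====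
def near_signs (sign : String) : String :=
  let s := sign.toList
  let options : List Char :=
    if PySem.Chars.isIn s pvKb0 then
      let i := PySem.Chars.find pvKb0 s
      [pvGetC pvKb0 (i-1), pvGetC pvKb0 i, pvGetC pvKb0 (i+1)]
        ++ [pvGetC pvKb1 (i-1), pvGetC pvKb1 i]
    else if PySem.Chars.isIn s pvKb1 then
      let i := PySem.Chars.find pvKb1 s
      [pvGetC pvKb0 i, pvGetC pvKb0 (i+1)]
        ++ [pvGetC pvKb1 (i-1), pvGetC pvKb1 i, pvGetC pvKb1 (i+1)]
        ++ [pvGetC pvKb2 (i-1), pvGetC pvKb2 i]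
    else
      let i := PySem.Chars.find pvKb2 s
      [pvGetC pvKb1 i, pvGetC pvKb1 (i+1)]
        ++ [pvGetC pvKb2 (i-1), pvGetC pvKb2 i, pvGetC pvKb2 (i+1)]
  String.ofList (PySem.Chars.replace options ['#'] [])

-- ===== PORT B =====
def pvKeyboard : List (List Char) := [pvKb0, pvKb1, pvKb2]
def pvRow (r : Int) : List Char := (PySem.List.pyGet? pvKeyboard r).getD []

-- the row-major scan of the whole grid with the adjacency predicate, for position (r,i)
def pvScan (r i : Int) : List Char :=
  (PySem.List.enumerate pvKeyboard).foldl
    (fun acc p =>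
      (PySem.List.enumerate p.2).foldl
        (fun acc2 q =>
          let d : Int := p.1 - r
          let e : Int := q.1 - i
          if d.natAbs ≤ 1 ∧ e.natAbs ≤ 1 ∧ (d + e).natAbs ≤ 1 ∧ q.2 ≠ '#'
          then acc2 ++ [q.2] else acc2) acc) []

def near_signs_alt (sign : String) : String :=
  let s := sign.toList
  let r : Int :=
    if PySem.Chars.isIn s pvKb0 then 0
    else if PySem.Chars.isIn s pvKb1 then 1
    else 2
  let i := PySem.Chars.find (pvRow r) s
  String.ofList (pvScan r i)

-- ===== PRECONDITION & SPEC =====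
def Spec_near_signs (sign : String) (out : String) : Prop := out = near_signs_alt sign
instance (sign : String) (out : String) : Decidable (Spec_near_signs sign out) := by unfold Spec_near_signs; infer_instance

-- ===== CLAIM =====
def Claim_equal_near_signs : Prop := ∀ (sign : String), Dom_near_signs sign → Spec_near_signs sign (near_signs sign)

-- ===== LEMMAS AND PROOFS =====

-- with the row fixed, both programs are the same function of i = find(row, sign);
-- -1 ≤ i ≤ len(row), so a finite case check closes each branch
theorem pv_row0_eq (i : Int) (h1 : -1 ≤ i) (h2 : i ≤ 16) :
    PySem.Chars.replace
      ([pvGetC pvKb0 (i-1), pvGetC pvKb0 i, pvGetC pvKb0 (i+1)]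
        ++ [pvGetC pvKb1 (i-1), pvGetC pvKb1 i]) ['#'] []
    = pvScan 0 i := by
  interval_cases i <;> decide

theorem pv_row1_eq (i : Int) (h1 : -1 ≤ i) (h2 : i ≤ 15) :
    PySem.Chars.replace
      ([pvGetC pvKb0 i, pvGetC pvKb0 (i+1)]
        ++ [pvGetC pvKb1 (i-1), pvGetC pvKb1 i, pvGetC pvKb1 (i+1)]
        ++ [pvGetC pvKb2 (i-1), pvGetC pvKb2 i]) ['#'] []
    = pvScan 1 i := by
  interval_cases i <;> decide

theorem pv_row2_eq (i : Int) (h1 : -1 ≤ i) (h2 : i ≤ 13) :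
    PySem.Chars.replace
      ([pvGetC pvKb1 i, pvGetC pvKb1 (i+1)]
        ++ [pvGetC pvKb2 (i-1), pvGetC pvKb2 i, pvGetC pvKb2 (i+1)]) ['#'] []
    = pvScan 2 i := by
  interval_cases i <;> decide

-- ===== VERDICT =====
theorem near_signs_spec : Claim_equal_near_signs := by
  intro sign _
  unfold Spec_near_signs near_signs near_signs_alt
  by_cases h0 : PySem.Chars.isIn sign.toList pvKb0 = true
  · simp only [h0, if_true]
    have hr : pvRow 0 = pvKb0 := by decide
    rw [hr]
    exact congrArg String.ofList
      (pv_row0_eq _ (PySem.Chars.neg_one_le_find _ _)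
        (le_trans (PySem.Chars.find_le_length _ _) (by decide)))
  · by_cases h1 : PySem.Chars.isIn sign.toList pvKb1 = true
    · simp only [h0, h1, Bool.false_eq_true, if_false, if_true]
      have hr : pvRow 1 = pvKb1 := by decide
      rw [hr]
      exact congrArg String.ofList
        (pv_row1_eq _ (PySem.Chars.neg_one_le_find _ _)
          (le_trans (PySem.Chars.find_le_length _ _) (by decide)))
    · simp only [h0, h1, Bool.false_eq_true, if_false]
      have hr : pvRow 2 = pvKb2 := by decide
      rw [hr]
      exact congrArg String.ofList
        (pv_row2_eq _ (PySem.Chars.neg_one_le_find _ _)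
          (le_trans (PySem.Chars.find_le_length _ _) (by decide)))
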